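-- pv_equiv track=rewrite | github.com/lakazatong/satis | test.py | count_merges
-- ===== SOURCE A (Python) =====
-- def count_merges(n, m, l):
-- 	if l < 0: raise ValueError("cannot merge negative amount of nodes")
-- 	if l <= 1: return l
-- 	r = 0
-- 	while l > 1:
-- 		r += 1
-- 		l -= 2
-- 	return r
-- ===== SOURCE B (Python) =====
-- def count_merges(n, m, l):
-- 	if l < 0: raise ValueError("cannot merge negative amount of nodes")
-- 	if l <= 1: return l
-- 	return l // 2
-- ===== Notes on version B (the rewrite author's own statement) =====
-- stated objective: faster
-- what changed: Replaced the subtract-2 counting loop with the closed form l // 2 (keeping the l <= 1 early return).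
import Mathlib
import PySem

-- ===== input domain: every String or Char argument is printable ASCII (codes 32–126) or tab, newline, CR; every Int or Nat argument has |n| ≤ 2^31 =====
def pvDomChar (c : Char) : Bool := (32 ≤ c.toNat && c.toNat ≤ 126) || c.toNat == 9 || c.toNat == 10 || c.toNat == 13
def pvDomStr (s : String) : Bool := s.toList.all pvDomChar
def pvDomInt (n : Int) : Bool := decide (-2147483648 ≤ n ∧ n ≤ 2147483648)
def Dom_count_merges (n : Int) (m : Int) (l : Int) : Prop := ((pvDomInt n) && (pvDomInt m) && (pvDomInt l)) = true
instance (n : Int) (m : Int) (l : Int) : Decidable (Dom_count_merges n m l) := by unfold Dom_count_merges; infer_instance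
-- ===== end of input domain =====

-- B replaces A's subtract-2 counting loop by the closed form l // 2 (asymptotically faster).


-- ===== PORT A =====
-- A's `while l > 1: r += 1; l -= 2` loop, step for step
def countMergesLoop (r : Int) (l : Int) : Int :=
  if h : l > 1 then countMergesLoop (r + 1) (l - 2) else r
termination_by l.toNat
decreasing_by
  have : 1 < l := h
  omega

def count_merges (n : Int) (m : Int) (l : Int) : Int :=
  if l ≤ 1 then l
  else countMergesLoop 0 l

-- ===== PORT B =====
def count_merges_alt (n : Int) (m : Int) (l : Int) : Int :=
  if l ≤ 1 then l
  else PySem.Int.floordiv l 2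

-- ===== PRECONDITION & SPEC =====
-- Pre_ excludes l < 0, on which the Python A raises ValueError.
def Pre_count_merges (n : Int) (m : Int) (l : Int) : Prop := 0 ≤ l
instance (n : Int) (m : Int) (l : Int) : Decidable (Pre_count_merges n m l) := by unfold Pre_count_merges; infer_instance
def pvWitness_count_merges : Int × Int × Int := (1, 2, 5)
def Spec_count_merges (n : Int) (m : Int) (l : Int) (out : Int) : Prop := out = count_merges_alt n m l
instance (n : Int) (m : Int) (l : Int) (out : Int) : Decidable (Spec_count_merges n m l out) := by unfold Spec_count_merges; infer_instance

-- ===== CLAIM (what is proved, stated in full; the proofs are below) =====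
def Claim_equal_count_merges : Prop := ∀ (n : Int) (m : Int) (l : Int), Dom_count_merges n m l → Pre_count_merges n m l → Spec_count_merges n m l (count_merges n m l)

-- ===== LEMMAS AND PROOFS =====
theorem countMergesLoop_eq (k : Nat) : ∀ (r l : Int), l.toNat = k → 1 < l → countMergesLoop r l = r + PySem.Int.floordiv l 2 := by
  induction k using Nat.strong_induction_on with
  | _ k ih =>
    intro r l hk hl
    rw [countMergesLoop]
    simp only [hl, dite_true]
    by_cases h2 : 1 < l - 2
    · have := ih (l - 2).toNat (by omega) (r + 1) (l - 2) rfl h2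
      rw [this]
      simp [PySem.Int.floordiv, Int.fdiv_eq_ediv]
      omega
    · rw [countMergesLoop]
      simp only [h2, dite_false]
      simp [PySem.Int.floordiv, Int.fdiv_eq_ediv]
      omega

-- ===== VERDICT (by name: the statement is the Claim_ definition above) =====
theorem count_merges_spec : Claim_equal_count_merges := by
  intro n m l _ hpre
  unfold Spec_count_merges count_merges count_merges_alt
  by_cases h : l ≤ 1
  · simp [h]
  · simp only [h, if_false]
    exact countMergesLoop_eq l.toNat 0 l rfl (by omega) |>.trans (by ring)
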